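-- pv_equiv track=rewrite | github.com/uPiscium/mindcraft | mindcraft_py/config.py | _strip_js_line_comments
-- ===== SOURCE A (Python) =====
-- def _strip_js_line_comments(content):
--     result = []
--     in_string = None
--     escape_next = False
--     index = 0
--
--     while index < len(content):
--         char = content[index]
--         next_char = content[index + 1] if index + 1 < len(content) else ""
--
--         if in_string:
--             result.append(char)
--             if escape_next:
--                 escape_next = False
--             elif char == "\\":
--                 escape_next = True
--             elif char == in_string:
--                 in_string = None
--             index += 1
--             continue
--
--         if char in {'"', "'"}:
--             in_string = char
--             result.append(char)
--             index += 1
--             continue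
--
--         if char == "/" and next_char == "/":
--             while index < len(content) and content[index] != "\n":
--                 index += 1
--             continue
--
--         result.append(char)
--         index += 1
--
--     return "".join(result)
-- ===== SOURCE B (Python) =====
-- def _strip_js_line_comments(content):
--     out = []
--     i = 0
--     n = len(content)
--     while i < n:
--         c = content[i]
--         if c in '"\'':
--             j = i + 1
--             while j < n:
--                 if content[j] == '\\':
--                     j += 2
--                 elif content[j] == c:
--                     j += 1
--                     break
--                 else:
--                     j += 1
--             out.append(content[i:j])
--             i = j
--         elif c == '/' and content.startswith('//', i):
--             j = content.find('\n', i)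
--             i = n if j == -1 else j
--         else:
--             out.append(c)
--             i += 1
--     return ''.join(out)
-- ===== Notes on version B (the rewrite author's own statement) =====
-- stated objective: faster
-- what changed: Replaces the per-character state machine (in_string/escape_next flags) by a chunked scanner that consumes a whole string literal with an inner index jump (skipping escapes two at a time) and appends it as one slice, and skips comments with str.find.
import Mathlib
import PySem

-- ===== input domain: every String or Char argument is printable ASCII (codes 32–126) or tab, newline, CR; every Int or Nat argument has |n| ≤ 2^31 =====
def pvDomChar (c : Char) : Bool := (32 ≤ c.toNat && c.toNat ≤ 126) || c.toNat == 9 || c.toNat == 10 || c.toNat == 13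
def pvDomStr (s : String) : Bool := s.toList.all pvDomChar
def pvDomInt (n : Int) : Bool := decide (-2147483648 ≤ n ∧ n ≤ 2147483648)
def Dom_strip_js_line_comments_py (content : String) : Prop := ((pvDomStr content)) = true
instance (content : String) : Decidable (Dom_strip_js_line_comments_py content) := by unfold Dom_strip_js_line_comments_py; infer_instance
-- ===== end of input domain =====

-- B replaces A's per-character in_string/escape_next state machine by a chunked scanner
-- (consume a whole string literal as one slice, skip a comment with find); return values proved equal.

-- ===== PORT A =====
-- A's inner `while index < len and content[index] != '\n'` comment-skipping loop
def skipCommentA (cs : List Char) (i : Nat) : Nat :=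
  if h : i < cs.length then
    if cs[i] = '\n' then i else skipCommentA cs (i + 1)
  else i
termination_by cs.length - i

-- termination facts for the outer loop (the comment branch jumps several positions)
theorem skipCommentA_ge (cs : List Char) (i : Nat) : i ≤ skipCommentA cs i := by
  fun_induction skipCommentA with
  | case1 => omega
  | case2 i h hnl ih => omega
  | case3 => omega

theorem skipCommentA_gt (cs : List Char) (i : Nat) (h : i < cs.length)
    (hc : cs[i] ≠ '\n') : i < skipCommentA cs i := by
  rw [skipCommentA, dif_pos h, if_neg hc]
  have := skipCommentA_ge cs (i + 1)
  omega

-- A's main while loop: state = index, in_string, escape_next, result accumulator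
def loopA (cs : List Char) (i : Nat) (instr : Option Char) (esc : Bool) (acc : List Char) :
    List Char :=
  -- A's `char`/`next_char` locals are inlined as cs[i] / cs[i+1]?
  if h : i < cs.length then
    match instr with
    | some q =>
      if esc then loopA cs (i + 1) (some q) false (acc ++ [cs[i]])
      else if cs[i] = '\\' then loopA cs (i + 1) (some q) true (acc ++ [cs[i]])
      else if cs[i] = q then loopA cs (i + 1) none false (acc ++ [cs[i]])
      else loopA cs (i + 1) (some q) false (acc ++ [cs[i]])
    | none =>
      if cs[i] = '"' ∨ cs[i] = '\'' then loopA cs (i + 1) (some cs[i]) false (acc ++ [cs[i]])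
      else if hcm : cs[i] = '/' ∧ cs[i + 1]? = some '/' then
        loopA cs (skipCommentA cs i) none false acc
      else loopA cs (i + 1) none false (acc ++ [cs[i]])
  else acc
termination_by cs.length - i
decreasing_by
  all_goals try omega
  have : i < skipCommentA cs i := by
    apply skipCommentA_gt cs i h
    intro hn
    exact absurd (hcm.1.symm.trans hn) (by decide)
  omega

def strip_js_line_comments_py (content : String) : String :=
  String.ofList (loopA content.toList 0 none false [])

-- ===== PORT B =====
-- B's inner string-literal loop: from just after the opening quote, jump by 2 over escapes,
-- stop just after the closing quote; returns the index where scanning resumes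
def takeStrB (cs : List Char) (q : Char) (j : Nat) : Nat :=
  if h : j < cs.length then
    if cs[j] = '\\' then takeStrB cs q (j + 2)
    else if cs[j] = q then j + 1
    else takeStrB cs q (j + 1)
  else j
termination_by cs.length - j

theorem takeStrB_ge (cs : List Char) (q : Char) (j : Nat) : j ≤ takeStrB cs q j := by
  fun_induction takeStrB with
  | case1 => omega
  | case2 => omega
  | case3 => omega
  | case4 => omega

-- B's `content.find('\n', i)` (none = Python's -1)
def findNLB (cs : List Char) (j : Nat) : Option Nat :=
  if h : j < cs.length then
    if cs[j] = '\n' then some j else findNLB cs (j + 1)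
  else none
termination_by cs.length - j

theorem findNLB_ge (cs : List Char) (k : Nat) : ∀ l, findNLB cs k = some l → k ≤ l := by
  induction k using findNLB.induct cs with
  | case1 k h hnl => intro l hk; rw [findNLB, dif_pos h, if_pos hnl] at hk; simp at hk; omega
  | case2 k h hnl ih => intro l hk; rw [findNLB, dif_pos h, if_neg hnl] at hk; have := ih l hk; omega
  | case3 k h => intro l hk; rw [findNLB, dif_neg h] at hk; simp at hk

theorem findNLB_gt (cs : List Char) (i j : Nat) (h : findNLB cs i = some j)
    (hi : i < cs.length) (hc : cs[i] ≠ '\n') : i < j := by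
  rw [findNLB, dif_pos hi, if_neg hc] at h
  have := findNLB_ge cs (i + 1) j h
  omega

-- B's main while loop: no string/escape state, only index + accumulator
def loopB (cs : List Char) (i : Nat) (acc : List Char) : List Char :=
  -- B's `c` local is inlined as cs[i]
  if h : i < cs.length then
    if cs[i] = '"' ∨ cs[i] = '\'' then
      loopB cs (takeStrB cs cs[i] (i + 1)) (acc ++ (cs.take (takeStrB cs cs[i] (i + 1))).drop i)
    else if hcm : cs[i] = '/' ∧ cs[i + 1]? = some '/' then
      loopB cs (match findNLB cs i with | none => cs.length | some j => j) acc
    else loopB cs (i + 1) (acc ++ [cs[i]])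
  else acc
termination_by cs.length - i
decreasing_by
  · have := takeStrB_ge cs cs[i] (i + 1); omega
  · rcases hfn : findNLB cs i with _ | j
    · simp; omega
    · simp only []
      have : i < j := by
        apply findNLB_gt cs i j hfn h
        intro hn
        exact absurd (hcm.1.symm.trans hn) (by decide)
      omega
  · omega

def strip_js_line_comments_py_alt (content : String) : String :=
  String.ofList (loopB content.toList 0 [])

-- ===== PRECONDITION & SPEC =====
def Spec_strip_js_line_comments_py (content : String) (out : String) : Prop := out = strip_js_line_comments_py_alt content
instance (content : String) (out : String) : Decidable (Spec_strip_js_line_comments_py content out) := by unfold Spec_strip_js_line_comments_py; infer_instance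

-- ===== CLAIM (what is proved, stated in full; the proofs are below) =====
def Claim_equal_strip_js_line_comments_py : Prop := ∀ (content : String), Dom_strip_js_line_comments_py content → Spec_strip_js_line_comments_py content (strip_js_line_comments_py content)

-- ===== LEMMAS AND PROOFS =====

theorem drop_take_cons (cs : List Char) (i j : Nat) (hi : i < cs.length) (hij : i < j) :
    (cs.take j).drop i = cs[i] :: (cs.take j).drop (i + 1) := by
  have h : i < (cs.take j).length := by simp; omega
  rw [List.drop_eq_getElem_cons h]
  simp

-- A's comment skip lands where B's find does
theorem skip_eq_find (cs : List Char) (i : Nat) (hi : i ≤ cs.length) :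
    skipCommentA cs i = (match findNLB cs i with | none => cs.length | some j => j) := by
  fun_induction skipCommentA with
  | case1 i h hnl => rw [findNLB]; simp [h, hnl]
  | case2 i h hnl ih =>
    rw [findNLB, dif_pos h, if_neg hnl]
    exact ih (by omega)
  | case3 i h =>
    rw [findNLB, dif_neg h]
    have : i = cs.length := by omega
    simp [this]

-- unfold lemmas for the two loops (rw [loopA] leaves a match/dite shell; these give clean ifs)
theorem loopA_some (cs : List Char) (q : Char) (i : Nat) (esc : Bool) (acc : List Char)
    (h : i < cs.length) :
    loopA cs i (some q) esc acc =
      if esc then loopA cs (i + 1) (some q) false (acc ++ [cs[i]])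
      else if cs[i] = '\\' then loopA cs (i + 1) (some q) true (acc ++ [cs[i]])
      else if cs[i] = q then loopA cs (i + 1) none false (acc ++ [cs[i]])
      else loopA cs (i + 1) (some q) false (acc ++ [cs[i]]) := by
  rw [loopA, dif_pos h]

theorem loopA_none (cs : List Char) (i : Nat) (acc : List Char) (h : i < cs.length) :
    loopA cs i none false acc =
      if cs[i] = '"' ∨ cs[i] = '\'' then loopA cs (i + 1) (some cs[i]) false (acc ++ [cs[i]])
      else if _hcm : cs[i] = '/' ∧ cs[i + 1]? = some '/' then
        loopA cs (skipCommentA cs i) none false acc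
      else loopA cs (i + 1) none false (acc ++ [cs[i]]) := by
  rw [loopA, dif_pos h]

theorem loopA_exit (cs : List Char) (i : Nat) (instr : Option Char) (esc : Bool)
    (acc : List Char) (h : ¬ i < cs.length) : loopA cs i instr esc acc = acc := by
  rw [loopA, dif_neg h]

theorem loopB_cons (cs : List Char) (i : Nat) (acc : List Char) (h : i < cs.length) :
    loopB cs i acc =
      if cs[i] = '"' ∨ cs[i] = '\'' then
        loopB cs (takeStrB cs cs[i] (i + 1)) (acc ++ (cs.take (takeStrB cs cs[i] (i + 1))).drop i)
      else if _hcm : cs[i] = '/' ∧ cs[i + 1]? = some '/' then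
        loopB cs (match findNLB cs i with | none => cs.length | some j => j) acc
      else loopB cs (i + 1) (acc ++ [cs[i]]) := by
  rw [loopB, dif_pos h]

theorem loopB_exit (cs : List Char) (i : Nat) (acc : List Char) (h : ¬ i < cs.length) :
    loopB cs i acc = acc := by
  rw [loopB, dif_neg h]

-- A's in-string state machine, run from position i, equals jumping straight to
-- takeStrB's endpoint and appending the whole slice
theorem strEq (cs : List Char) (q : Char) (i : Nat) :
    ∀ acc, i ≤ cs.length →
      loopA cs i (some q) false acc =
        loopA cs (takeStrB cs q i) none false (acc ++ (cs.take (takeStrB cs q i)).drop i) := by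
  induction i using takeStrB.induct cs q with
  | case1 i h hbs ih =>
    -- backslash: A appends it, sets escape, then unconditionally appends the next char
    intro acc hi
    have ht : takeStrB cs q i = takeStrB cs q (i + 2) := by
      rw [takeStrB, dif_pos h, if_pos hbs]
    rw [ht, loopA_some cs q i false acc h, if_neg (by decide : ¬ (false = true)), if_pos hbs]
    by_cases h2 : i + 1 < cs.length
    · rw [loopA_some cs q (i + 1) true _ h2, if_pos rfl, ih _ (by omega)]
      congr 1
      have hge := takeStrB_ge cs q (i + 2)
      rw [drop_take_cons cs i _ h (by omega), drop_take_cons cs (i + 1) _ h2 (by omega)]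
      simp
    · have hlen : cs.length = i + 1 := by omega
      rw [loopA_exit cs (i + 1) _ _ _ h2]
      have ht2 : takeStrB cs q (i + 2) = i + 2 := by
        rw [takeStrB, dif_neg (by omega)]
      rw [ht2, loopA_exit cs (i + 2) _ _ _ (by omega)]
      rw [drop_take_cons cs i (i + 2) h (by omega)]
      have : (cs.take (i + 2)).drop (i + 1) = [] := by
        apply List.drop_eq_nil_of_le; simp; try omega
      simp [this]
  | case2 i h hbs hq =>
    -- closing quote
    intro acc hi
    have ht : takeStrB cs q i = i + 1 := by
      rw [takeStrB, dif_pos h, if_neg hbs, if_pos hq]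
    rw [ht, loopA_some cs q i false acc h, if_neg (by decide : ¬ (false = true)),
        if_neg hbs, if_pos hq]
    congr 1
    rw [drop_take_cons cs i (i + 1) h (by omega)]
    have : (cs.take (i + 1)).drop (i + 1) = [] := by
      apply List.drop_eq_nil_of_le; simp; try omega
    simp [this]
  | case3 i h hbs hq ih =>
    -- ordinary in-string character
    intro acc hi
    have ht : takeStrB cs q i = takeStrB cs q (i + 1) := by
      rw [takeStrB, dif_pos h, if_neg hbs, if_neg hq]
    rw [ht, loopA_some cs q i false acc h, if_neg (by decide : ¬ (false = true)),
        if_neg hbs, if_neg hq, ih _ (by omega)]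
    congr 1
    have hge := takeStrB_ge cs q (i + 1)
    rw [drop_take_cons cs i _ h (by omega)]
    simp
  | case4 i h =>
    -- unterminated string: both return the accumulator so far
    intro acc hi
    have ht : takeStrB cs q i = i := by rw [takeStrB, dif_neg h]
    rw [ht, loopA_exit cs i _ _ _ h, loopA_exit cs i _ _ _ h]
    have : (cs.take i).drop i = [] := by
      apply List.drop_eq_nil_of_le; simp; try omega
    simp [this]

theorem mainEq (cs : List Char) (i : Nat) (acc : List Char) :
    loopA cs i none false acc = loopB cs i acc := by
  induction i, acc using loopB.induct cs with
  | case1 i acc h hq ih =>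
    -- opening quote: A enters string mode; strEq collapses it to B's slice jump
    rw [loopA_none cs i acc h, if_pos hq, loopB_cons cs i acc h, if_pos hq,
        strEq cs cs[i] (i + 1) _ (by omega)]
    have hge := takeStrB_ge cs cs[i] (i + 1)
    have : acc ++ [cs[i]] ++ (cs.take (takeStrB cs cs[i] (i + 1))).drop (i + 1) =
        acc ++ (cs.take (takeStrB cs cs[i] (i + 1))).drop i := by
      rw [drop_take_cons cs i _ h (by omega)]
      simp
    rw [this]
    exact ih
  | case2 i acc h hq hcm ih =>
    -- comment: same landing index by skip_eq_find
    rw [loopA_none cs i acc h, if_neg hq, dif_pos hcm, loopB_cons cs i acc h, if_neg hq,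
        dif_pos hcm, skip_eq_find cs i (by omega)]
    exact ih
  | case3 i acc h hq hcm ih =>
    rw [loopA_none cs i acc h, if_neg hq, dif_neg hcm, loopB_cons cs i acc h, if_neg hq,
        dif_neg hcm]
    exact ih
  | case4 i acc h =>
    rw [loopA_exit cs i _ _ _ h, loopB_exit cs i _ h]

-- ===== VERDICT (by name: the statement is the Claim_ definition above) =====
theorem strip_js_line_comments_py_spec : Claim_equal_strip_js_line_comments_py := by
  intro content _
  unfold Spec_strip_js_line_comments_py strip_js_line_comments_py strip_js_line_comments_py_alt
  rw [mainEq]
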